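-- pv_equiv track=rewrite | github.com/MNico99/Sintaxis-TP02 | automatas.py | A_If
-- ===== SOURCE A (Python) =====
-- TRAMPA = -1
--
-- RESULTADO_ACEPTADO = "ACEPTADO"
--
-- RESULTADO_TRAMPA = "TRAMPA"
--
-- RESULTADO_NO_ACEPTADO = "NO_ACEPTADO"
--
-- def d_If(estado_anterior, caracter):
--     if estado_anterior == 0 and caracter == "i":
--         return 1
--     if estado_anterior == 1 and caracter == "f":
--         return 2
--
--     return TRAMPA
--
-- def A_If(cadena):
--     Finales = [2]
--     estado_actual = 0
--
--     for caracter in cadena: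
--         estado_proximo = d_If(estado_actual, caracter)
--         if estado_proximo == TRAMPA:
--             return RESULTADO_TRAMPA
--         estado_actual = estado_proximo
--
--     if estado_actual in Finales:
--         return RESULTADO_ACEPTADO
--     else:
--         return RESULTADO_NO_ACEPTADO
-- ===== SOURCE B (Python) =====
-- RESULTADO_ACEPTADO = "ACEPTADO"
-- RESULTADO_TRAMPA = "TRAMPA"
-- RESULTADO_NO_ACEPTADO = "NO_ACEPTADO"
--
-- def A_If(cadena):
--     chars = list(cadena)
--     if chars == ['i', 'f']:
--         return RESULTADO_ACEPTADO
--     if chars == [] or chars == ['i']: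
--         return RESULTADO_NO_ACEPTADO
--     return RESULTADO_TRAMPA
-- ===== Notes on version B (the rewrite author's own statement) =====
-- stated objective: simpler
-- what changed: Replaces the stepwise DFA transition-function loop with a direct closed-form classification of the whole input: equal to 'if' -> ACEPTADO, a proper prefix ('' or 'i') -> NO_ACEPTADO, anything else -> TRAMPA.
import Mathlib
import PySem

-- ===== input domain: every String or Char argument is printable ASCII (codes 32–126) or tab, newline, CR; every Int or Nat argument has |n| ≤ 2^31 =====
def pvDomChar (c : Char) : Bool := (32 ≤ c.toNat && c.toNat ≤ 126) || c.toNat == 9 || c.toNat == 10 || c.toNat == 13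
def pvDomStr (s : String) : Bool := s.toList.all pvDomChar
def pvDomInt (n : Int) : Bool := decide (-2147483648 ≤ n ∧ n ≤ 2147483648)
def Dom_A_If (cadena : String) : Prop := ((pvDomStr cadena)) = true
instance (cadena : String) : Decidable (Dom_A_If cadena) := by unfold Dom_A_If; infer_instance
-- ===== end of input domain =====

-- B replaces A's stepwise DFA iteration by a closed-form classification of the whole string (simpler).

-- ===== PORT A =====
-- transition function d_If
def d_If (estado_anterior : Int) (caracter : Char) : Int :=
  if estado_anterior = 0 ∧ caracter = 'i' then 1
  else if estado_anterior = 1 ∧ caracter = 'f' then 2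
  else -1

-- the for-loop with early return, as structural recursion over the char list
def A_If_loop (estado_actual : Int) : List Char → String
  | [] => if estado_actual = 2 then "ACEPTADO" else "NO_ACEPTADO"
  | c :: cs =>
    let estado_proximo := d_If estado_actual c
    if estado_proximo = -1 then "TRAMPA" else A_If_loop estado_proximo cs

def A_If (cadena : String) : String := A_If_loop 0 cadena.toList

-- ===== PORT B =====
def A_If_alt (cadena : String) : String :=
  let chars := cadena.toList
  if chars = ['i', 'f'] then "ACEPTADO"
  else if chars = [] ∨ chars = ['i'] then "NO_ACEPTADO"
  else "TRAMPA"

-- ===== PRECONDITION & SPEC =====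
def Spec_A_If (cadena : String) (out : String) : Prop := out = A_If_alt cadena
instance (cadena : String) (out : String) : Decidable (Spec_A_If cadena out) := by unfold Spec_A_If; infer_instance

-- ===== CLAIM (what is proved, stated in full; the proofs are below) =====
def Claim_equal_A_If : Prop := ∀ (cadena : String), Dom_A_If cadena → Spec_A_If cadena (A_If cadena)

-- ===== LEMMAS AND PROOFS =====
theorem A_If_loop_eq (l : List Char) :
    A_If_loop 0 l =
      (if l = ['i', 'f'] then "ACEPTADO"
       else if l = [] ∨ l = ['i'] then "NO_ACEPTADO"
       else "TRAMPA") := by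
  match l with
  | [] => simp [A_If_loop]
  | c :: cs =>
    by_cases hc : c = 'i'
    · subst hc
      match cs with
      | [] => simp [A_If_loop, d_If]
      | c2 :: cs2 =>
        by_cases hc2 : c2 = 'f'
        · subst hc2
          match cs2 with
          | [] => simp [A_If_loop, d_If]
          | c3 :: cs3 => simp [A_If_loop, d_If]
        · simp [A_If_loop, d_If, hc2]
    · simp [A_If_loop, d_If, hc]

-- ===== VERDICT (by name: the statement is the Claim_ definition above) =====
theorem A_If_spec : Claim_equal_A_If := by
  intro cadena _
  unfold Spec_A_If A_If A_If_alt
  exact A_If_loop_eq cadena.toList
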